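-- pv_equiv track=rewrite | github.com/azwadkm22/Genomics-4223-Labs | Assignment_3/36.py | createTheSequences
-- ===== SOURCE A (Python) =====
-- def createTheSequences(commandList, s1, s2):
--     i = 1
--     j = 1
--     seqA = ""
--     seqB = ""
--     for cmd in commandList:
--         if cmd == "Diagonal":
--             seqA = seqA + s1[i]
--             seqB = seqB + s2[j]
--             i =  i + 1
--             j = j + 1
--         elif cmd == "Deletion":
--             seqA = seqA + "-"
--             seqB = seqB + s2[j]
--             j = j + 1
--         elif cmd == "Insertion":
--             seqA = seqA + s1[i]
--             seqB = seqB + '-'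
--             i = i + 1
--
--     return seqA, seqB
-- ===== SOURCE B (Python) =====
-- def createTheSequences(commandList, s1, s2):
--     # Two separate passes: build seqA from s1 alone, then seqB from s2 alone.
--     i = 1
--     seqA = ""
--     for cmd in commandList:
--         if cmd == "Diagonal" or cmd == "Insertion":
--             seqA = seqA + s1[i]
--             i = i + 1
--         elif cmd == "Deletion":
--             seqA = seqA + "-"
--     j = 1
--     seqB = ""
--     for cmd in commandList:
--         if cmd == "Diagonal" or cmd == "Deletion":
--             seqB = seqB + s2[j]
--             j = j + 1
--         elif cmd == "Insertion":
--             seqB = seqB + "-"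
--     return seqA, seqB
-- ===== Notes on version B (the rewrite author's own statement) =====
-- stated objective: alternative
-- what changed: Replaces the single interleaved loop over (i, j, seqA, seqB) by two independent passes, each maintaining only one index and building one aligned string from one input sequence.
import Mathlib
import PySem

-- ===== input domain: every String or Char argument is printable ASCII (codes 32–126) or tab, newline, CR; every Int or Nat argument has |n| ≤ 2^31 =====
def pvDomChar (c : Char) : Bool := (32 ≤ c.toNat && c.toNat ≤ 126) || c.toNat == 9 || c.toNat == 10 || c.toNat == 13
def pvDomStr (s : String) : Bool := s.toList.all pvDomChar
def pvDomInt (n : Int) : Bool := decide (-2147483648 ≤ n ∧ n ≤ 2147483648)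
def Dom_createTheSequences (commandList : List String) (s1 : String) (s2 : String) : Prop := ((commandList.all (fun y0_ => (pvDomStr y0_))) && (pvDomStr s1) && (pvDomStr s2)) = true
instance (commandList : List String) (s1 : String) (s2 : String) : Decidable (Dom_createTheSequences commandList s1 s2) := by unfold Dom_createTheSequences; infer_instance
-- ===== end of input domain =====

-- B rebuilds the two aligned strings in two independent single-index passes instead of A's one interleaved pass; alternative decomposition, same cost.
-- ===== PORT A =====
-- the single interleaved loop of A; none = IndexError
def pvLoopA (s1 s2 : String) : List String → Int → Int → List Char → List Char → Option (List Char × List Char)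
  | [], _, _, a, b => some (a, b)
  | cmd :: rest, i, j, a, b =>
    if cmd = "Diagonal" then
      match PySem.Str.pyGet? s1 i with
      | none => none
      | some c1 =>
        match PySem.Str.pyGet? s2 j with
        | none => none
        | some c2 => pvLoopA s1 s2 rest (i + 1) (j + 1) (a ++ [c1]) (b ++ [c2])
    else if cmd = "Deletion" then
      match PySem.Str.pyGet? s2 j with
      | none => none
      | some c2 => pvLoopA s1 s2 rest i (j + 1) (a ++ ['-']) (b ++ [c2])
    else if cmd = "Insertion" then
      match PySem.Str.pyGet? s1 i with
      | none => none
      | some c1 => pvLoopA s1 s2 rest (i + 1) j (a ++ [c1]) (b ++ ['-'])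
    else pvLoopA s1 s2 rest i j a b

def createTheSequences (commandList : List String) (s1 : String) (s2 : String) : String × String :=
  match pvLoopA s1 s2 commandList 1 1 [] [] with
  | some (a, b) => (String.ofList a, String.ofList b)
  | none => ("", "")  -- unreachable under Pre_ (Python raises IndexError here)

-- ===== PORT B =====
-- first pass of B: seqA from s1 alone
def pvLoop1 (s1 : String) : List String → Int → List Char → Option (List Char)
  | [], _, a => some a
  | cmd :: rest, i, a =>
    if cmd = "Diagonal" ∨ cmd = "Insertion" then
      match PySem.Str.pyGet? s1 i with
      | none => none
      | some c1 => pvLoop1 s1 rest (i + 1) (a ++ [c1])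
    else if cmd = "Deletion" then pvLoop1 s1 rest i (a ++ ['-'])
    else pvLoop1 s1 rest i a

-- second pass of B: seqB from s2 alone
def pvLoop2 (s2 : String) : List String → Int → List Char → Option (List Char)
  | [], _, b => some b
  | cmd :: rest, j, b =>
    if cmd = "Diagonal" ∨ cmd = "Deletion" then
      match PySem.Str.pyGet? s2 j with
      | none => none
      | some c2 => pvLoop2 s2 rest (j + 1) (b ++ [c2])
    else if cmd = "Insertion" then pvLoop2 s2 rest j (b ++ ['-'])
    else pvLoop2 s2 rest j b

def createTheSequences_alt (commandList : List String) (s1 : String) (s2 : String) : String × String :=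
  match pvLoop1 s1 commandList 1 [], pvLoop2 s2 commandList 1 [] with
  | some a, some b => (String.ofList a, String.ofList b)
  | _, _ => ("", "")  -- unreachable under Pre_

-- ===== PRECONDITION & SPEC =====
-- Pre_ excludes exactly the inputs on which the Python A raises IndexError (the 1-based
-- indexing runs past the end of s1 or s2); it is exact: A returns iff Pre_ holds.
def Pre_createTheSequences (commandList : List String) (s1 : String) (s2 : String) : Prop :=
  (commandList.countP (fun c => c = "Diagonal" ∨ c = "Insertion") = 0 ∨
     commandList.countP (fun c => c = "Diagonal" ∨ c = "Insertion") < s1.length) ∧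
  (commandList.countP (fun c => c = "Diagonal" ∨ c = "Deletion") = 0 ∨
     commandList.countP (fun c => c = "Diagonal" ∨ c = "Deletion") < s2.length)
instance (commandList : List String) (s1 : String) (s2 : String) : Decidable (Pre_createTheSequences commandList s1 s2) := by unfold Pre_createTheSequences; infer_instance

def pvWitness_createTheSequences : List String × String × String :=
  (["Diagonal", "Deletion", "Insertion"], "abc", "xyz")

def Spec_createTheSequences (commandList : List String) (s1 : String) (s2 : String) (out : String × String) : Prop := out = createTheSequences_alt commandList s1 s2
instance (commandList : List String) (s1 : String) (s2 : String) (out : String × String) : Decidable (Spec_createTheSequences commandList s1 s2 out) := by unfold Spec_createTheSequences; infer_instance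

-- ===== CLAIM (what is proved, stated in full; the proofs are below) =====
def Claim_equal_createTheSequences : Prop := ∀ (commandList : List String) (s1 : String) (s2 : String), Dom_createTheSequences commandList s1 s2 → Pre_createTheSequences commandList s1 s2 → Spec_createTheSequences commandList s1 s2 (createTheSequences commandList s1 s2)

-- ===== LEMMAS AND PROOFS =====

-- Fusion: A's interleaved loop is the pairing of B's two independent passes.
theorem pvLoopA_eq (s1 s2 : String) (cl : List String) :
    ∀ (i j : Int) (a b : List Char),
      pvLoopA s1 s2 cl i j a b =
        (pvLoop1 s1 cl i a).bind (fun x => (pvLoop2 s2 cl j b).map (fun y => (x, y))) := by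
  induction cl with
  | nil => intro i j a b; simp [pvLoopA, pvLoop1, pvLoop2]
  | cons cmd rest ih =>
    intro i j a b
    by_cases h1 : cmd = "Diagonal"
    · subst h1
      simp only [pvLoopA, pvLoop1, pvLoop2, true_or, if_true]
      cases PySem.Str.pyGet? s1 i with
      | none => simp
      | some c1 =>
        cases PySem.Str.pyGet? s2 j with
        | none => cases pvLoop1 s1 rest (i + 1) (a ++ [c1]) <;> simp
        | some c2 => exact ih (i + 1) (j + 1) (a ++ [c1]) (b ++ [c2])
    · by_cases h2 : cmd = "Deletion"
      · subst h2
        simp only [pvLoopA, pvLoop1, pvLoop2, or_true, if_true]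
        cases PySem.Str.pyGet? s2 j with
        | none => cases pvLoop1 s1 rest i (a ++ ['-']) <;> simp
        | some c2 => exact ih i (j + 1) (a ++ ['-']) (b ++ [c2])
      · by_cases h3 : cmd = "Insertion"
        · subst h3
          simp only [pvLoopA, pvLoop1, pvLoop2, or_true, if_true]
          cases PySem.Str.pyGet? s1 i with
          | none => simp
          | some c1 => exact ih (i + 1) j (a ++ [c1]) (b ++ ['-'])
        · have hA : ¬(cmd = "Diagonal" ∨ cmd = "Insertion") := by
            rintro (h | h) <;> [exact h1 h; exact h3 h]
          have hB : ¬(cmd = "Diagonal" ∨ cmd = "Deletion") := by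
            rintro (h | h) <;> [exact h1 h; exact h2 h]
          simp only [pvLoopA, pvLoop1, pvLoop2]
          rw [if_neg h1, if_neg h2, if_neg h3, if_neg hA, if_neg h2, if_neg hB,
            if_neg h3]
          exact ih i j a b

theorem createTheSequences_spec : Claim_equal_createTheSequences := by
  intro cl s1 s2 _ _
  unfold Spec_createTheSequences createTheSequences createTheSequences_alt
  rw [pvLoopA_eq]
  cases pvLoop1 s1 cl 1 [] <;> cases pvLoop2 s2 cl 1 [] <;> simp
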